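-- pv_equiv track=rewrite | github.com/ArielSanroj/runtime-supervisor | packages/supervisor-discover/src/supervisor_discover/scanners/agent_orchestrators.py | _is_parallel_dispatch_method
-- ===== SOURCE A (Python) =====
-- _PARALLEL_DISPATCH_PATTERNS: tuple[tuple[str, tuple[str, ...]], ...] = (
--     ("dispatch_", ()),                 # any dispatch_*
--     ("handle_", ()),                   # any handle_*
--     ("route_", ()),                    # any route_*
--     ("send_", ("_alert", "_notification", "_message", "_email", "_sms", "_invite")),
--     ("process_", ("_event", "_message", "_alert")),
--     ("on_", ("_event", "_message")),
-- )
--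
-- _DISPATCH_HELPERS = frozenset({
--     "dispatch", "handle", "execute", "send", "process", "route",
--     "_create_and_dispatch", "_dispatch", "_handle", "_execute",
-- })
--
-- def _is_parallel_dispatch_method(name: str) -> bool:
--     """True when `name` looks like one of N peer dispatch methods (e.g.
--     `dispatch_sla_alert`, `send_email_invite`). Filters out:
--       - private/dunder methods (`_dispatch_to_log`, `__init__`)
--       - the catch-all `dispatch`/`handle`/`execute` (those are the *target*
--         if a class has them — we don't double-count them as peers).
--     """
--     if name.startswith("_") or name == "":
--         return False
--     if name in _DISPATCH_HELPERS:
--         return False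
--     for prefix, suffixes in _PARALLEL_DISPATCH_PATTERNS:
--         if not name.startswith(prefix):
--             continue
--         # `dispatch_` alone (no suffix) was excluded above. Require something
--         # after the prefix to count: `dispatch_foo` is parallel, `dispatch` is
--         # the catch-all helper.
--         rest = name[len(prefix):]
--         if not rest:
--             continue
--         if not suffixes:
--             return True
--         return any(rest.endswith(suf) for suf in suffixes)
--     return False
-- ===== SOURCE B (Python) =====
-- # B: split the name once at its first underscore and look the head word up in
-- # two small tables (bare prefixes / suffix-checked prefixes), instead of A's
-- # linear scan over a prefix-pattern tuple with slicing and a helper-name set.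
-- _BARE = frozenset({"dispatch", "handle", "route"})
--
-- _SUFFIXED = {
--     "send": ("_alert", "_notification", "_message", "_email", "_sms", "_invite"),
--     "process": ("_event", "_message", "_alert"),
--     "on": ("_event", "_message"),
-- }
--
-- def _is_parallel_dispatch_method(name: str) -> bool:
--     head, sep, rest = name.partition("_")
--     if not head or not sep:
--         # empty name, leading underscore (private/dunder), or no underscore
--         # at all (which also covers the bare helper names like "dispatch").
--         return False
--     if head in _BARE:
--         return bool(rest)
--     suffixes = _SUFFIXED.get(head)
--     if suffixes is None:
--         return False
--     return any(rest.endswith(s) for s in suffixes)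
-- ===== Notes on version B (the rewrite author's own statement) =====
-- stated objective: alternative
-- what changed: A scans a tuple of (prefix, suffixes) patterns with startswith, slicing and a helper-name set; B splits the name once at its first underscore with str.partition and looks the head word up in a bare-prefix set and a suffix dict, which also makes the helper-set check unnecessary.
import Mathlib
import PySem

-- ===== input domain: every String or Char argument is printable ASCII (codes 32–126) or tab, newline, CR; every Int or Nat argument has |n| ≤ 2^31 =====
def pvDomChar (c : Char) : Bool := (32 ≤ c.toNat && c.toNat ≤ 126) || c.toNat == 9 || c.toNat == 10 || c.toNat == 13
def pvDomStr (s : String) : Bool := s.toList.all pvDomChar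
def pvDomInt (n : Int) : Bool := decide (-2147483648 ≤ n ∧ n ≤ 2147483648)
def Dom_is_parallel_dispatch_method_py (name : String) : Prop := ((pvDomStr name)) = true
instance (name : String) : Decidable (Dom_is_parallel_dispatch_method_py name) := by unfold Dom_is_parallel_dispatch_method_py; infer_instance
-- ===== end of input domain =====

-- B replaces A's linear scan over a prefix-pattern tuple (with slicing and a helper-name
-- set) by one split of the name at its first underscore followed by a table lookup of the
-- head word (objective: alternative decomposition, same cost).

-- ===== PORT A =====
-- _PARALLEL_DISPATCH_PATTERNS
def pyPatterns : List (List Char × List (List Char)) :=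
  [("dispatch_".toList, []),
   ("handle_".toList, []),
   ("route_".toList, []),
   ("send_".toList, ["_alert".toList, "_notification".toList, "_message".toList, "_email".toList, "_sms".toList, "_invite".toList]),
   ("process_".toList, ["_event".toList, "_message".toList, "_alert".toList]),
   ("on_".toList, ["_event".toList, "_message".toList])]

-- _DISPATCH_HELPERS (a frozenset of literals used only for a membership test)
def pyHelpers : List (List Char) :=
  ["dispatch".toList, "handle".toList, "execute".toList, "send".toList, "process".toList,
   "route".toList, "_create_and_dispatch".toList, "_dispatch".toList, "_handle".toList, "_execute".toList]

-- the `for prefix, suffixes in _PARALLEL_DISPATCH_PATTERNS` loop, step for step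
def pyLoopA : List (List Char × List (List Char)) → List Char → Bool
  | [], _ => false
  | (pre, sufs) :: ps, cs =>
    if ¬ PySem.Chars.startswith cs pre then pyLoopA ps cs       -- continue
    else
      -- rest = name[len(prefix):]
      let rest := PySem.List.slice cs (some (pre.length : Int)) none
      if rest = [] then pyLoopA ps cs                            -- continue
      else if sufs = [] then true
      else sufs.any (fun suf => PySem.Chars.endswith rest suf)   -- return any(...)

def is_parallel_dispatch_method_py (name : String) : Bool :=
  let cs := name.toList
  if PySem.Chars.startswith cs "_".toList ∨ cs = [] then false
  else if cs ∈ pyHelpers then false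
  else pyLoopA pyPatterns cs

-- ===== PORT B =====
def bBare : List (List Char) := ["dispatch".toList, "handle".toList, "route".toList]

def bSuffixed : List (List Char × List (List Char)) :=
  [("send".toList, ["_alert".toList, "_notification".toList, "_message".toList, "_email".toList, "_sms".toList, "_invite".toList]),
   ("process".toList, ["_event".toList, "_message".toList, "_alert".toList]),
   ("on".toList, ["_event".toList, "_message".toList])]

-- `head, sep, rest = name.partition("_")` for the one-char separator "_", ported by
-- hand (exact here: head = the longest '_'-free prefix, sep exists iff head is shorter
-- than the whole string, rest = everything after the first '_').
def is_parallel_dispatch_method_py_alt (name : String) : Bool :=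
  let cs := name.toList
  let head := cs.takeWhile (fun c => c != '_')
  let rest := cs.drop (head.length + 1)
  if head = [] ∨ ¬ head.length < cs.length then false            -- not head or not sep
  else if head ∈ bBare then rest ≠ []                            -- bool(rest)
  else
    match bSuffixed.find? (fun kv => kv.1 == head) with          -- _SUFFIXED.get(head)
    | none => false
    | some (_, sufs) => sufs.any (fun s => PySem.Chars.endswith rest s)

-- ===== PRECONDITION & SPEC =====
def Spec_is_parallel_dispatch_method_py (name : String) (out : Bool) : Prop := out = is_parallel_dispatch_method_py_alt name
instance (name : String) (out : Bool) : Decidable (Spec_is_parallel_dispatch_method_py name out) := by unfold Spec_is_parallel_dispatch_method_py; infer_instance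

-- ===== CLAIM (what is proved, stated in full; the proofs are below) =====
def Claim_equal_is_parallel_dispatch_method_py : Prop := ∀ (name : String), Dom_is_parallel_dispatch_method_py name → Spec_is_parallel_dispatch_method_py name (is_parallel_dispatch_method_py name)

-- ===== LEMMAS AND PROOFS =====

-- A's test `name.startswith(prefix)` for a pattern prefix `w ++ "_"`, read through B's
-- split: it holds iff the head of the split is exactly `w` and a separator exists.
theorem startswith_word (cs w : List Char) (hw : '_' ∉ w) :
    PySem.Chars.startswith cs (w ++ ['_']) =
      (decide (cs.takeWhile (fun c => c != '_') = w) &&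
       decide (cs.dropWhile (fun c => c != '_') ≠ [])) := by
  rw [Bool.eq_iff_iff, PySem.Chars.startswith_iff]
  simp only [Bool.and_eq_true, decide_eq_true_eq]
  constructor
  · rintro ⟨r, hr⟩
    have hcs : cs = w ++ '_' :: r := by simpa using hr.symm
    have hwall : ∀ x ∈ w, (x != '_') = true := by
      intro x hx
      simp only [bne_iff_ne, ne_eq]
      rintro rfl
      exact hw hx
    subst hcs
    rw [List.takeWhile_append_of_pos hwall, List.dropWhile_append_of_pos hwall]
    simp [List.takeWhile, List.dropWhile]
  · rintro ⟨hh, ht⟩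
    have hhead : (((cs.dropWhile (fun c => c != '_')).head ht) != '_') = false :=
      List.head_dropWhile_not _ ht
    have hhd : (cs.dropWhile (fun c => c != '_')).head ht = '_' := by
      simpa using hhead
    refine ⟨(cs.dropWhile (fun c => c != '_')).tail, ?_⟩
    conv_rhs => rw [← List.takeWhile_append_dropWhile (p := fun c => c != '_') (l := cs)]
    rw [hh, ← List.cons_head_tail ht, hhd]
    simp

-- dropping past a pattern prefix is dropping past the first underscore
theorem rest_eq (cs w : List Char) (hh : cs.takeWhile (fun c => c != '_') = w) :
    cs.drop (w.length + 1) = (cs.dropWhile (fun c => c != '_')).tail := by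
  conv_lhs => rw [← List.takeWhile_append_dropWhile (p := fun c => c != '_') (l := cs), hh]
  rw [← List.drop_drop, List.drop_left, List.drop_one]

-- a pattern prefix (which contains '_') cannot match a name without '_'
theorem startswith_no_underscore (cs w : List Char) (hcs : '_' ∉ cs) (hw : '_' ∈ w) :
    PySem.Chars.startswith cs w = false := by
  rw [← Bool.not_eq_true, PySem.Chars.startswith_iff]
  intro hpre
  exact hcs (hpre.mem hw)

theorem is_parallel_dispatch_method_py_eq (name : String) :
    is_parallel_dispatch_method_py name = is_parallel_dispatch_method_py_alt name := by
  unfold is_parallel_dispatch_method_py is_parallel_dispatch_method_py_alt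
  dsimp only
  rw [show "_".toList = ['_'] by decide]
  generalize name.toList = cs
  by_cases hempty : cs.takeWhile (fun c => c != '_') = []
  · -- empty name or leading '_': both sides take their first branch
    have hA : PySem.Chars.startswith cs ['_'] ∨ cs = [] := by
      cases cs with
      | nil => exact Or.inr rfl
      | cons c cs' =>
        left
        have hc : c = '_' := by
          by_contra hne
          rw [List.takeWhile_cons] at hempty
          simp [hne] at hempty
        subst hc
        rw [PySem.Chars.startswith_iff]
        exact ⟨cs', rfl⟩
    rw [if_pos hA, if_pos (Or.inl hempty)]
  · have hcsne : cs ≠ [] := fun hnil => hempty (by rw [hnil]; rfl)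
    have hA : ¬ (PySem.Chars.startswith cs ['_'] ∨ cs = []) := by
      rintro (hs | hnil)
      · rw [PySem.Chars.startswith_iff] at hs
        rcases hs with ⟨r, hr⟩
        rw [← hr] at hempty
        simp at hempty
      · exact hcsne hnil
    rw [if_neg hA]
    have hlensplit : cs.length =
        (cs.takeWhile (fun c => c != '_')).length + (cs.dropWhile (fun c => c != '_')).length := by
      conv_rhs => rw [← List.length_append, List.takeWhile_append_dropWhile]
    by_cases hsep : cs.dropWhile (fun c => c != '_') = []
    · -- no underscore at all: both sides are false
      have hnou : '_' ∉ cs := by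
        intro hm
        have hm' : '_' ∈ cs.takeWhile (fun c => c != '_') := by
          conv at hm => rw [← List.takeWhile_append_dropWhile (p := fun c => c != '_') (l := cs)]
          rcases List.mem_append.mp hm with h | h
          · exact h
          · rw [hsep] at h; simp at h
        have := List.mem_takeWhile_imp hm'
        simp at this
      have hlen : ¬ (cs.takeWhile (fun c => c != '_')).length < cs.length := by
        rw [hlensplit, hsep]; simp
      rw [if_pos (Or.inr hlen)]
      have hloop : pyLoopA pyPatterns cs = false := by
        simp only [pyPatterns, pyLoopA]
        rw [startswith_no_underscore cs _ hnou (by decide),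
            startswith_no_underscore cs _ hnou (by decide),
            startswith_no_underscore cs _ hnou (by decide),
            startswith_no_underscore cs _ hnou (by decide),
            startswith_no_underscore cs _ hnou (by decide),
            startswith_no_underscore cs _ hnou (by decide)]
        simp
      by_cases hhelp : cs ∈ pyHelpers
      · rw [if_pos hhelp]
      · rw [if_neg hhelp, hloop]
    · -- a separator exists
      have hmem : '_' ∈ cs := by
        have hhd : (cs.dropWhile (fun c => c != '_')).head hsep = '_' := by
          have := List.head_dropWhile_not (l := cs) (p := fun c => c != '_') hsep
          simpa using this
        have hmemd := List.head_mem hsep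
        rw [hhd] at hmemd
        exact (List.dropWhile_sublist (l := cs) (p := fun c => c != '_')).mem hmemd
      have hlen : (cs.takeWhile (fun c => c != '_')).length < cs.length := by
        rw [hlensplit]
        have := List.length_pos_of_ne_nil hsep
        omega
      have hhelp : cs ∉ pyHelpers := by
        intro hm
        simp only [pyHelpers, List.mem_cons, List.not_mem_nil, or_false] at hm
        rcases hm with h | h | h | h | h | h | h | h | h | h <;> rw [h] at hempty hmem <;>
          first
            | (revert hmem; decide)
            | (exact hempty (by decide))
      rw [if_neg hhelp,
          if_neg (show ¬(List.takeWhile (fun c => c != '_') cs = [] ∨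
              ¬(List.takeWhile (fun c => c != '_') cs).length < cs.length) from
            fun hor => hor.elim hempty (fun h' => h' hlen))]
      -- rewrite A's six startswith tests through the split
      have hsw : ∀ w : List Char, '_' ∉ w →
          PySem.Chars.startswith cs (w ++ ['_']) = decide (cs.takeWhile (fun c => c != '_') = w) := by
        intro w hw
        rw [startswith_word cs w hw]
        simp [hsep]
      have hrest : ∀ w : List Char, cs.takeWhile (fun c => c != '_') = w →
          cs.drop (w.length + 1) = (cs.dropWhile (fun c => c != '_')).tail :=
        fun w hw => rest_eq cs w hw
      simp only [pyPatterns, pyLoopA, PySem.List.slice_from_natCast]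
      rw [show ("dispatch_".toList) = "dispatch".toList ++ ['_'] by decide,
          show ("handle_".toList) = "handle".toList ++ ['_'] by decide,
          show ("route_".toList) = "route".toList ++ ['_'] by decide,
          show ("send_".toList) = "send".toList ++ ['_'] by decide,
          show ("process_".toList) = "process".toList ++ ['_'] by decide,
          show ("on_".toList) = "on".toList ++ ['_'] by decide]
      rw [hsw "dispatch".toList (by decide), hsw "handle".toList (by decide),
          hsw "route".toList (by decide), hsw "send".toList (by decide),
          hsw "process".toList (by decide), hsw "on".toList (by decide)]
      by_cases h1 : cs.takeWhile (fun c => c != '_') = "dispatch".toList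
      · rw [show ("dispatch".toList ++ ['_']).length = "dispatch".toList.length + 1 by simp, h1, hrest _ h1]
        by_cases h' : (cs.dropWhile (fun c => c != '_')).tail = [] <;> simp [h', bBare]
      by_cases h2 : cs.takeWhile (fun c => c != '_') = "handle".toList
      · rw [show ("handle".toList ++ ['_']).length = "handle".toList.length + 1 by simp, h2, hrest _ h2]
        by_cases h' : (cs.dropWhile (fun c => c != '_')).tail = [] <;> simp [h', bBare]
      by_cases h3 : cs.takeWhile (fun c => c != '_') = "route".toList
      · rw [show ("route".toList ++ ['_']).length = "route".toList.length + 1 by simp, h3, hrest _ h3]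
        by_cases h' : (cs.dropWhile (fun c => c != '_')).tail = [] <;> simp [h', bBare]
      by_cases h4 : cs.takeWhile (fun c => c != '_') = "send".toList
      · rw [show ("send".toList ++ ['_']).length = "send".toList.length + 1 by simp, h4, hrest _ h4]
        simp [bBare, bSuffixed]
        intro hor h0
        rw [h0] at hor
        revert hor
        decide
      by_cases h5 : cs.takeWhile (fun c => c != '_') = "process".toList
      · rw [show ("process".toList ++ ['_']).length = "process".toList.length + 1 by simp, h5, hrest _ h5]
        simp [bBare, bSuffixed, List.find?]
        intro hor h0
        rw [h0] at hor
        revert hor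
        decide
      by_cases h6 : cs.takeWhile (fun c => c != '_') = "on".toList
      · rw [show ("on".toList ++ ['_']).length = "on".toList.length + 1 by simp, h6, hrest _ h6]
        simp [bBare, bSuffixed, List.find?]
        intro hor h0
        rw [h0] at hor
        revert hor
        decide
      · have H1 : ¬ List.takeWhile (fun c => c != '_') cs = ['d','i','s','p','a','t','c','h'] := by simpa using h1
        have H2 : ¬ List.takeWhile (fun c => c != '_') cs = ['h','a','n','d','l','e'] := by simpa using h2
        have H3 : ¬ List.takeWhile (fun c => c != '_') cs = ['r','o','u','t','e'] := by simpa using h3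
        have H4 : ¬ List.takeWhile (fun c => c != '_') cs = ['s','e','n','d'] := by simpa using h4
        have H5 : ¬ List.takeWhile (fun c => c != '_') cs = ['p','r','o','c','e','s','s'] := by simpa using h5
        have H6 : ¬ List.takeWhile (fun c => c != '_') cs = ['o','n'] := by simpa using h6
        have H4' : ¬ ['s','e','n','d'] = List.takeWhile (fun c => c != '_') cs := fun h => H4 h.symm
        have H5' : ¬ ['p','r','o','c','e','s','s'] = List.takeWhile (fun c => c != '_') cs := fun h => H5 h.symm
        have H6' : ¬ ['o','n'] = List.takeWhile (fun c => c != '_') cs := fun h => H6 h.symm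
        have B4 : ((['s','e','n','d'] : List Char) == List.takeWhile (fun c => c != '_') cs) = false :=
          beq_eq_false_iff_ne.mpr H4'
        have B5 : ((['p','r','o','c','e','s','s'] : List Char) == List.takeWhile (fun c => c != '_') cs) = false :=
          beq_eq_false_iff_ne.mpr H5'
        have B6 : ((['o','n'] : List Char) == List.takeWhile (fun c => c != '_') cs) = false :=
          beq_eq_false_iff_ne.mpr H6'
        simp [bBare, bSuffixed, List.find?, H1, H2, H3, H4, H5, H6, B4, B5, B6]

-- ===== VERDICT (by name: the statement is the Claim_ definition above) =====
theorem is_parallel_dispatch_method_py_spec : Claim_equal_is_parallel_dispatch_method_py := by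
  intro name _
  unfold Spec_is_parallel_dispatch_method_py
  exact is_parallel_dispatch_method_py_eq name
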